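-- pv_equiv track=rewrite | github.com/wickednull/KTOX_Pi | payloads/recon/wall_of_flippers.py | _classify_flipper
-- ===== SOURCE A (Python) =====
-- from typing import Dict, List, Optional, Tuple
--
-- FLIPPER_TYPES = {
--     "00003081-0000-1000-8000-00805f9b34fb": "B",
--     "00003082-0000-1000-8000-00805f9b34fb": "W",
--     "00003083-0000-1000-8000-00805f9b34fb": "T",
-- }
--
-- FLIPPER_OUIS = ("80:e1:26", "80:e1:27", "0c:fa:22")
--
-- FLIPPER_UID_PREFIX = "0000308"
--
-- FLIPPER_UID_SUFFIX = "0000-1000-8000-00805f9b34fb"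
--
-- def _classify_flipper(mac: str, name: str, packets: List[str]) -> Tuple[bool, str, str, str]:
--     uid = "UNK"
--     dtype = "UNK"
--     is_flipper = False
--     detection = "Unknown"
--     key_found = False
--
--     for packet in packets:
--         p_low = str(packet).lower()
--         if p_low in FLIPPER_TYPES:
--             uid = p_low
--             dtype = FLIPPER_TYPES[p_low]
--             key_found = True
--             is_flipper = True
--             detection = "Identifier"
--             break
--
--     if not key_found:
--         for packet in packets:
--             p_low = str(packet).lower()
--             if p_low.startswith(FLIPPER_UID_PREFIX) and p_low.endswith(FLIPPER_UID_SUFFIX):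
--                 uid = p_low
--                 dtype = "SPF"
--                 is_flipper = True
--                 detection = "Identifier"
--                 break
--
--     if name.lower().startswith("flipper"):
--         is_flipper = True
--         detection = "Name"
--         if uid == "UNK":
--             uid = "name-only"
--         if dtype == "UNK":
--             dtype = "N"
--     elif mac.startswith(FLIPPER_OUIS):
--         is_flipper = True
--         if detection == "Unknown":
--             detection = "Address"
--         if uid == "UNK":
--             uid = "oui-only"
--         if dtype == "UNK":
--             dtype = "O"
--     elif is_flipper and detection == "Unknown":
--         detection = "Identifier"
--
--     return is_flipper, uid, dtype, detection
-- ===== SOURCE B (Python) =====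
-- from typing import Dict, List, Optional, Tuple
--
-- FLIPPER_TYPES = {
--     "00003081-0000-1000-8000-00805f9b34fb": "B",
--     "00003082-0000-1000-8000-00805f9b34fb": "W",
--     "00003083-0000-1000-8000-00805f9b34fb": "T",
-- }
--
-- FLIPPER_OUIS = ("80:e1:26", "80:e1:27", "0c:fa:22")
--
-- FLIPPER_UID_PREFIX = "0000308"
--
-- FLIPPER_UID_SUFFIX = "0000-1000-8000-00805f9b34fb"
--
--
-- def _classify_flipper(mac: str, name: str, packets: List[str]) -> Tuple[bool, str, str, str]:
--     # single pass: exact-key match wins, else remember the first prefix/suffix candidate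
--     found = None          # (uid, dtype) from the identifier scan, or None
--     pending = None        # first prefix/suffix candidate seen so far
--     for packet in packets:
--         p_low = str(packet).lower()
--         t = FLIPPER_TYPES.get(p_low)
--         if t is not None:
--             found = (p_low, t)
--             break
--         if pending is None and p_low.startswith(FLIPPER_UID_PREFIX) and p_low.endswith(FLIPPER_UID_SUFFIX):
--             pending = p_low
--     if found is None and pending is not None:
--         found = (pending, "SPF")
--
--     if name.lower().startswith("flipper"):
--         if found is None:
--             return True, "name-only", "N", "Name"
--         return True, found[0], found[1], "Name"
--     if mac.startswith(FLIPPER_OUIS):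
--         if found is None:
--             return True, "oui-only", "O", "Address"
--         return True, found[0], found[1], "Identifier"
--     if found is None:
--         return False, "UNK", "UNK", "Unknown"
--     return True, found[0], found[1], "Identifier"
-- ===== Notes on version B (the rewrite author's own statement) =====
-- stated objective: alternative
-- what changed: One single pass over packets with an Option state (exact match breaks, first prefix/suffix candidate is remembered) replaces A's two sequential scans, and the mutable five-variable override block becomes an early-return chain over the optional identifier result.
import Mathlib
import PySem

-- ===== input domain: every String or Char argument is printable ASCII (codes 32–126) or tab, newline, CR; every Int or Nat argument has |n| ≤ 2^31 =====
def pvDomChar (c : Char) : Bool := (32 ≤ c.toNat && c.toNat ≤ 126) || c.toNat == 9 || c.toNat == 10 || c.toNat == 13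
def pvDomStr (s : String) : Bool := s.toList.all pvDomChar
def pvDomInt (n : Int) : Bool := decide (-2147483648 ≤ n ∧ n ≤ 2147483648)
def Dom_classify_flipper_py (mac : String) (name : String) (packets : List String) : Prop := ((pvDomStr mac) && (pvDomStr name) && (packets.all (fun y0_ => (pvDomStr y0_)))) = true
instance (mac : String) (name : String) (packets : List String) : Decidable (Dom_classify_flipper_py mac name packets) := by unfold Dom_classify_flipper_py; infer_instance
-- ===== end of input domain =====

-- B replaces A's two sequential packet scans by one single pass with an optional pending
-- candidate, and the mutable override block by an early-return chain (alternative, same cost).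

-- ===== PORT A =====
def FLIPPER_TYPES : PySem.Dict String String :=
  PySem.Dict.mk
    [("00003081-0000-1000-8000-00805f9b34fb", "B"),
     ("00003082-0000-1000-8000-00805f9b34fb", "W"),
     ("00003083-0000-1000-8000-00805f9b34fb", "T")]

-- A's first loop: state (uid, dtype, key_found, is_flipper, detection), break = return.
-- FLIPPER_TYPES[p_low] is guarded by the membership test, so getD is exact here.
def aScanExact (packets : List String) (uid dtype : String) (key_found is_flipper : Bool)
    (detection : String) : String × String × Bool × Bool × String :=
  match packets with
  | [] => (uid, dtype, key_found, is_flipper, detection)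
  | packet :: rest =>
    let p_low := PySem.Str.lower packet
    if FLIPPER_TYPES.contains p_low then
      (p_low, FLIPPER_TYPES.getD p_low dtype, true, true, "Identifier")
    else
      aScanExact rest uid dtype key_found is_flipper detection

-- A's second loop, entered only when key_found is false.
def aScanSpf (packets : List String) (uid dtype : String) (is_flipper : Bool)
    (detection : String) : String × String × Bool × String :=
  match packets with
  | [] => (uid, dtype, is_flipper, detection)
  | packet :: rest =>
    let p_low := PySem.Str.lower packet
    if PySem.Str.startswith p_low "0000308" &&
       PySem.Str.endswith p_low "0000-1000-8000-00805f9b34fb" then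
      (p_low, "SPF", true, "Identifier")
    else
      aScanSpf rest uid dtype is_flipper detection

def classify_flipper_py (mac : String) (name : String) (packets : List String) :
    Bool × String × String × String :=
  let st := aScanExact packets "UNK" "UNK" false false "Unknown"
  let uid := st.1
  let dtype := st.2.1
  let key_found := st.2.2.1
  let st2 :=
    if !key_found then aScanSpf packets uid dtype st.2.2.2.1 st.2.2.2.2
    else (uid, dtype, st.2.2.2.1, st.2.2.2.2)
  let uid := st2.1
  let dtype := st2.2.1
  let is_flipper := st2.2.2.1
  let detection := st2.2.2.2
  if PySem.Str.startswith (PySem.Str.lower name) "flipper" then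
    let detection := "Name"
    let uid := if uid == "UNK" then "name-only" else uid
    let dtype := if dtype == "UNK" then "N" else dtype
    (true, uid, dtype, detection)
  else if PySem.Str.startswith mac "80:e1:26" || PySem.Str.startswith mac "80:e1:27" ||
          PySem.Str.startswith mac "0c:fa:22" then
    let detection := if detection == "Unknown" then "Address" else detection
    let uid := if uid == "UNK" then "oui-only" else uid
    let dtype := if dtype == "UNK" then "O" else dtype
    (true, uid, dtype, detection)
  else if is_flipper && detection == "Unknown" then
    (is_flipper, uid, dtype, "Identifier")
  else
    (is_flipper, uid, dtype, detection)

-- ===== PORT B =====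
-- one pass: (exact-match result or none, first pending prefix/suffix candidate)
def bScan (packets : List String) (pending : Option String) :
    Option (String × String) × Option String :=
  match packets with
  | [] => (none, pending)
  | packet :: rest =>
    let p_low := PySem.Str.lower packet
    match FLIPPER_TYPES.get? p_low with
    | some t => (some (p_low, t), pending)
    | none =>
      if pending.isNone && PySem.Str.startswith p_low "0000308" &&
         PySem.Str.endswith p_low "0000-1000-8000-00805f9b34fb" then
        bScan rest (some p_low)
      else
        bScan rest pending

def classify_flipper_py_alt (mac : String) (name : String) (packets : List String) :
    Bool × String × String × String :=
  let scan := bScan packets none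
  let found : Option (String × String) :=
    match scan.1, scan.2 with
    | none, some c => some (c, "SPF")
    | f, _ => f
  if PySem.Str.startswith (PySem.Str.lower name) "flipper" then
    match found with
    | none => (true, "name-only", "N", "Name")
    | some (u, t) => (true, u, t, "Name")
  else if PySem.Str.startswith mac "80:e1:26" || PySem.Str.startswith mac "80:e1:27" ||
          PySem.Str.startswith mac "0c:fa:22" then
    match found with
    | none => (true, "oui-only", "O", "Address")
    | some (u, t) => (true, u, t, "Identifier")
  else
    match found with
    | none => (false, "UNK", "UNK", "Unknown")
    | some (u, t) => (true, u, t, "Identifier")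

-- ===== PRECONDITION & SPEC =====
def Spec_classify_flipper_py (mac : String) (name : String) (packets : List String) (out : Bool × String × String × String) : Prop := out = classify_flipper_py_alt mac name packets
instance (mac : String) (name : String) (packets : List String) (out : Bool × String × String × String) : Decidable (Spec_classify_flipper_py mac name packets out) := by unfold Spec_classify_flipper_py; infer_instance

-- ===== CLAIM (what is proved, stated in full; the proofs are below) =====
def Claim_equal_classify_flipper_py : Prop := ∀ (mac : String) (name : String) (packets : List String), Dom_classify_flipper_py mac name packets → Spec_classify_flipper_py mac name packets (classify_flipper_py mac name packets)

-- ===== LEMMAS AND PROOFS =====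

-- proof-side characterisations of the scans
def exactHit : List String → Option (String × String)
  | [] => none
  | p :: rest =>
    match FLIPPER_TYPES.get? (PySem.Str.lower p) with
    | some t => some (PySem.Str.lower p, t)
    | none => exactHit rest

def spfHit : List String → Option String
  | [] => none
  | p :: rest =>
    if PySem.Str.startswith (PySem.Str.lower p) "0000308" &&
       PySem.Str.endswith (PySem.Str.lower p) "0000-1000-8000-00805f9b34fb" then
      some (PySem.Str.lower p)
    else spfHit rest

lemma aScanExact_eq (packets : List String) (uid dtype : String) (kf fl : Bool) (det : String) :
    aScanExact packets uid dtype kf fl det =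
      match exactHit packets with
      | some (u, t) => (u, t, true, true, "Identifier")
      | none => (uid, dtype, kf, fl, det) := by
  induction packets with
  | nil => rfl
  | cons p rest ih =>
    simp only [aScanExact, exactHit]
    rcases hg : FLIPPER_TYPES.get? (PySem.Str.lower p) with _ | t
    · have hc : FLIPPER_TYPES.contains (PySem.Str.lower p) = false := by
        rw [PySem.Dict.contains_eq_isSome_get?, hg]; rfl
      rw [if_neg (by simp [hc]), ih]
    · have hc : FLIPPER_TYPES.contains (PySem.Str.lower p) = true := by
        rw [PySem.Dict.contains_eq_isSome_get?, hg]; rfl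
      have hd : FLIPPER_TYPES.getD (PySem.Str.lower p) dtype = t :=
        PySem.Dict.getD_of_get?_eq_some _ dtype hg
      rw [if_pos hc, hd]

lemma aScanSpf_eq (packets : List String) (uid dtype : String) (fl : Bool) (det : String) :
    aScanSpf packets uid dtype fl det =
      match spfHit packets with
      | some u => (u, "SPF", true, "Identifier")
      | none => (uid, dtype, fl, det) := by
  induction packets with
  | nil => rfl
  | cons p rest ih =>
    simp only [aScanSpf, spfHit]
    by_cases h : (PySem.Str.startswith (PySem.Str.lower p) "0000308" &&
        PySem.Str.endswith (PySem.Str.lower p) "0000-1000-8000-00805f9b34fb") = true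
    · rw [if_pos h, if_pos h]
    · rw [if_neg h, if_neg h, ih]

lemma bScan_fst (packets : List String) (pending : Option String) :
    (bScan packets pending).1 = exactHit packets := by
  induction packets generalizing pending with
  | nil => rfl
  | cons p rest ih =>
    simp only [bScan, exactHit]
    rcases hg : FLIPPER_TYPES.get? (PySem.Str.lower p) with _ | t
    · by_cases h : (pending.isNone && PySem.Str.startswith (PySem.Str.lower p) "0000308" &&
          PySem.Str.endswith (PySem.Str.lower p) "0000-1000-8000-00805f9b34fb") = true
      · rw [if_pos h, ih]
      · rw [if_neg h, ih]
    · rfl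

lemma bScan_snd_of_none (packets : List String) (pending : Option String)
    (h : exactHit packets = none) :
    (bScan packets pending).2 = pending.or (spfHit packets) := by
  induction packets generalizing pending with
  | nil => cases pending <;> rfl
  | cons p rest ih =>
    simp only [exactHit] at h
    rcases hg : FLIPPER_TYPES.get? (PySem.Str.lower p) with _ | t
    · rw [hg] at h
      simp only [bScan, hg, spfHit]
      cases pending with
      | none =>
        by_cases hc : (PySem.Str.startswith (PySem.Str.lower p) "0000308" &&
            PySem.Str.endswith (PySem.Str.lower p) "0000-1000-8000-00805f9b34fb") = true
        · rw [if_pos (by simpa using hc), if_pos hc, ih _ h]; rfl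
        · rw [if_neg (by simpa using hc), if_neg hc, ih _ h]
      | some c =>
        rw [if_neg (by simp), ih _ h]
        by_cases hc : (PySem.Str.startswith (PySem.Str.lower p) "0000308" &&
            PySem.Str.endswith (PySem.Str.lower p) "0000-1000-8000-00805f9b34fb") = true
        · rw [if_pos hc]; rfl
        · rw [if_neg hc]
    · simp only [hg] at h
      exact absurd h (by simp)

lemma exactHit_get? (packets : List String) (u t : String)
    (h : exactHit packets = some (u, t)) : FLIPPER_TYPES.get? u = some t := by
  induction packets with
  | nil => exact absurd h (by simp [exactHit])
  | cons p rest ih =>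
    simp only [exactHit] at h
    rcases hg : FLIPPER_TYPES.get? (PySem.Str.lower p) with _ | t'
    · rw [hg] at h; exact ih h
    · simp only [hg, Option.some.injEq, Prod.mk.injEq] at h
      obtain ⟨hu, ht⟩ := h
      subst hu; subst ht; exact hg

lemma spfHit_startswith (packets : List String) (u : String)
    (h : spfHit packets = some u) :
    PySem.Str.startswith u "0000308" = true := by
  induction packets with
  | nil => exact absurd h (by simp [spfHit])
  | cons p rest ih =>
    simp only [spfHit] at h
    by_cases hc : (PySem.Str.startswith (PySem.Str.lower p) "0000308" &&
        PySem.Str.endswith (PySem.Str.lower p) "0000-1000-8000-00805f9b34fb") = true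
    · rw [if_pos hc] at h
      cases h
      exact (Bool.and_eq_true ..).mp hc |>.1
    · rw [if_neg hc] at h; exact ih h

lemma ne_UNK_of_startswith (u : String) (h : PySem.Str.startswith u "0000308" = true) :
    (u == "UNK") = false := by
  rw [beq_eq_false_iff_ne]
  rintro rfl
  exact absurd h (by decide)

-- ===== VERDICT (by name: the statement is the Claim_ definition above) =====
theorem classify_flipper_py_spec : Claim_equal_classify_flipper_py := by
  intro mac name packets _
  unfold Spec_classify_flipper_py
  show classify_flipper_py mac name packets = classify_flipper_py_alt mac name packets
  unfold classify_flipper_py classify_flipper_py_alt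
  rcases hE : exactHit packets with _ | ⟨u, t⟩
  · rcases hS : spfHit packets with _ | v
    · simp only [aScanExact_eq, aScanSpf_eq, bScan_fst, bScan_snd_of_none packets none hE, hE, hS]
      simp
    · have hv := ne_UNK_of_startswith v (spfHit_startswith packets v hS)
      simp only [aScanExact_eq, aScanSpf_eq, bScan_fst, bScan_snd_of_none packets none hE, hE, hS]
      simp [hv]
  · have hm := PySem.Dict.mem_items_of_get?_eq_some FLIPPER_TYPES (exactHit_get? packets u t hE)
    simp only [aScanExact_eq, bScan_fst, hE]
    have hm' : (u = "00003081-0000-1000-8000-00805f9b34fb" ∧ t = "B") ∨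
        (u = "00003082-0000-1000-8000-00805f9b34fb" ∧ t = "W") ∨
        (u = "00003083-0000-1000-8000-00805f9b34fb" ∧ t = "T") := by
      simpa [FLIPPER_TYPES, PySem.Dict.items] using hm
    rcases hm' with ⟨rfl, rfl⟩ | ⟨rfl, rfl⟩ | ⟨rfl, rfl⟩ <;> simp
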